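-- pv_equiv track=rewrite | github.com/HinmQ21/Agent-ATTT | app/tools/google_search.py | _generate_summary
-- ===== SOURCE A (Python) =====
-- from typing import Dict, List
--
-- def _generate_summary(findings: List[Dict]) -> str:
--     """Generate summary from findings"""
--     if not findings:
--         return "No specific security intelligence found"
--
--     high_severity = [f for f in findings if f.get("severity") == "high"]
--     medium_severity = [f for f in findings if f.get("severity") == "medium"]
--
--     if high_severity:
--         return f"HIGH RISK: {high_severity[0]['description']}"
--     elif medium_severity:
--         return f"MEDIUM RISK: {medium_severity[0]['description']}"
--     else:
--         return "No significant security concerns found"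
-- ===== SOURCE B (Python) =====
-- from typing import Dict, List
--
-- def _generate_summary(findings: List[Dict]) -> str:
--     """Generate summary from findings"""
--     if not findings:
--         return "No specific security intelligence found"
--
--     first_medium = None
--     for f in findings:
--         sev = f.get("severity")
--         if sev == "high":
--             return f"HIGH RISK: {f['description']}"
--         if sev == "medium" and first_medium is None:
--             first_medium = f
--
--     if first_medium is not None:
--         return f"MEDIUM RISK: {first_medium['description']}"
--     return "No significant security concerns found"
-- ===== Notes on version B (the rewrite author's own statement) =====
-- stated objective: alternative
-- what changed: Replaces the two full filtering scans (building high_severity and medium_severity lists, then indexing [0]) with a single short-circuiting pass that returns immediately on the first 'high' finding and remembers only the first 'medium' one.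
import Mathlib
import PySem

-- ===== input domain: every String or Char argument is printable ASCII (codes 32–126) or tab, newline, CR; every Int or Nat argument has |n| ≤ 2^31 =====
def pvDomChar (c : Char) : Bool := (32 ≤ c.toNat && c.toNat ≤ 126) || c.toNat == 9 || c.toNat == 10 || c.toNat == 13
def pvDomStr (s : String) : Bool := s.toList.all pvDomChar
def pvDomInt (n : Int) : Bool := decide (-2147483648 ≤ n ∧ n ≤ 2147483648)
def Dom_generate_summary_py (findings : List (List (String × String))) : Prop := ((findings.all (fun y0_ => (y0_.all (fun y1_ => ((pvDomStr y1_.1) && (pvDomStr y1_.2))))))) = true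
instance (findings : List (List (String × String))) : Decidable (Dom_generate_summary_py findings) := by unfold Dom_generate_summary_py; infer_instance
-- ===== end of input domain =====

-- B collapses A's two filtering scans into one short-circuiting pass (objective: alternative);
-- equivalence is about the return value; f['description'] KeyError cases are excluded by Pre_.

-- f.get(k) on the association-list encoding of a dict: first match
def pvGetK (f : List (String × String)) (k : String) : Option String :=
  (PySem.Dict.mk f).get? k

-- ===== PORT A =====
def generate_summary_py (findings : List (List (String × String))) : String :=
  if findings = [] then "No specific security intelligence found"
  else
    let high_severity := findings.filter (fun f => pvGetK f "severity" == some "high")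
    let medium_severity := findings.filter (fun f => pvGetK f "severity" == some "medium")
    match high_severity with
    | f :: _ => "HIGH RISK: " ++ (pvGetK f "description").getD ""   -- f['description']; key present under Pre_
    | [] =>
      match medium_severity with
      | f :: _ => "MEDIUM RISK: " ++ (pvGetK f "description").getD ""   -- under Pre_
      | [] => "No significant security concerns found"

-- ===== PORT B =====
-- the single pass: early return on the first 'high', remember the first 'medium'
def pvScan (fs : List (List (String × String))) (first_medium : Option (List (String × String))) : String :=
  match fs with
  | [] =>
    match first_medium with
    | some m => "MEDIUM RISK: " ++ (pvGetK m "description").getD ""   -- under Pre_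
    | none => "No significant security concerns found"
  | f :: rest =>
    let sev := pvGetK f "severity"
    if sev == some "high" then "HIGH RISK: " ++ (pvGetK f "description").getD ""   -- under Pre_
    else if sev == some "medium" && first_medium.isNone then pvScan rest (some f)
    else pvScan rest first_medium

def generate_summary_py_alt (findings : List (List (String × String))) : String :=
  if findings = [] then "No specific security intelligence found"
  else pvScan findings none

-- ===== PRECONDITION & SPEC =====
-- Pre_ excludes exactly the inputs where Python raises KeyError: the first 'high'-severity
-- finding (or, absent any, the first 'medium' one) lacks the 'description' key.
def Pre_generate_summary_py (findings : List (List (String × String))) : Prop :=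
  (∀ f, (findings.filter (fun f => pvGetK f "severity" == some "high")).head? = some f →
      pvGetK f "description" ≠ none) ∧
  ((findings.filter (fun f => pvGetK f "severity" == some "high")) = [] →
    ∀ f, (findings.filter (fun f => pvGetK f "severity" == some "medium")).head? = some f →
      pvGetK f "description" ≠ none)
instance (findings : List (List (String × String))) : Decidable (Pre_generate_summary_py findings) := by unfold Pre_generate_summary_py; infer_instance

def pvWitness_generate_summary_py : (List (List (String × String))) :=
  [[("severity", "low")], [("severity", "medium"), ("description", "weak TLS")]]

def Spec_generate_summary_py (findings : List (List (String × String))) (out : String) : Prop := out = generate_summary_py_alt findings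
instance (findings : List (List (String × String))) (out : String) : Decidable (Spec_generate_summary_py findings out) := by unfold Spec_generate_summary_py; infer_instance

-- ===== CLAIM (what is proved, stated in full; the proofs are below) =====
def Claim_equal_generate_summary_py : Prop := ∀ (findings : List (List (String × String))), Dom_generate_summary_py findings → Pre_generate_summary_py findings → Spec_generate_summary_py findings (generate_summary_py findings)

-- ===== LEMMAS AND PROOFS =====

-- characterisation of the single pass in terms of A's two filters
theorem pvScan_eq (fs : List (List (String × String))) (acc : Option (List (String × String))) :
    pvScan fs acc =
      match fs.filter (fun f => pvGetK f "severity" == some "high") with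
      | f :: _ => "HIGH RISK: " ++ (pvGetK f "description").getD ""
      | [] =>
        match acc with
        | some m => "MEDIUM RISK: " ++ (pvGetK m "description").getD ""
        | none =>
          match fs.filter (fun f => pvGetK f "severity" == some "medium") with
          | f :: _ => "MEDIUM RISK: " ++ (pvGetK f "description").getD ""
          | [] => "No significant security concerns found" := by
  induction fs generalizing acc with
  | nil => cases acc <;> rfl
  | cons f rest ih =>
    simp only [pvScan, List.filter_cons]
    by_cases hh : pvGetK f "severity" == some "high"
    · simp [hh]
    · by_cases hm : pvGetK f "severity" == some "medium"
      · cases acc with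
        | none => simp [hh, hm, ih]
        | some m => simp [hh, hm, ih]
      · simp [hh, hm, ih]

theorem generate_summary_py_spec : Claim_equal_generate_summary_py := by
  intro findings _ _
  unfold Spec_generate_summary_py generate_summary_py generate_summary_py_alt
  by_cases h : findings = []
  · simp [h]
  · simp only [h, pvScan_eq]
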